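-- pv_equiv track=rewrite | github.com/AdamZhouSE/pythonHomework | Code/CodeRecords/2121/60639/264455.py | solution
-- ===== SOURCE A (Python) =====
-- def solution(n):
--     if n==1:
--         return 10
--     else:
--         pro=9
--         for i in range(n-1):
--             pro*=9-i
--         return(pro+solution(n-1))
-- ===== SOURCE B (Python) =====
-- def solution(n):
--     total = 10
--     pro = 9
--     for m in range(2, n + 1):
--         pro *= 11 - m
--         total += pro
--     return total
-- ===== Notes on version B (the rewrite author's own statement) =====
-- stated objective: faster
-- what changed: Replaced the recursion that rebuilds the falling-factorial product from scratch at every level with a single forward loop that maintains a running product and accumulates the sum, turning O(n^2) multiplications into O(n).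
-- outside the precondition, e.g. on solution(0): A raises RecursionError, B returns 10
import Mathlib
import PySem

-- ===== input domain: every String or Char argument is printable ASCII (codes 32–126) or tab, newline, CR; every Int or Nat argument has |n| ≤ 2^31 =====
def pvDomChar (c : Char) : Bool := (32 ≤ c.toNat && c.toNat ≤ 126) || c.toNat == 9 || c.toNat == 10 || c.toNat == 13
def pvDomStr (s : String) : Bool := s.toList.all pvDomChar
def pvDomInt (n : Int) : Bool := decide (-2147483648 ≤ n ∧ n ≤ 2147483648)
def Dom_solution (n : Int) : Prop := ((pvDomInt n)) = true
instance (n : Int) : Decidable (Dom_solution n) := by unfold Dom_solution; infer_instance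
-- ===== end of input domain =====

-- ===== PORT A =====
-- B replaces A's per-level recomputation of the product with one running-product pass (O(n^2) -> O(n) multiplications); for n <= 0 A recurses forever (RecursionError), excluded by Pre_.
-- Port of A. A recurses n -> n-1 and never terminates for n <= 0 (Python: RecursionError);
-- the 'n < 1' guard only makes the Lean function total there (outside Pre_solution).
def solution (n : Int) : Int :=
  if n == 1 then 10
  else if n < 1 then 0  -- totality guard: A diverges here; outside Pre_solution
  else
    (PySem.List.pyRange 0 (n - 1) 1).foldl (fun pro i => pro * (9 - i)) 9 + solution (n - 1)
termination_by n.toNat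
decreasing_by
  simp only [beq_iff_eq] at *
  omega

-- ===== PORT B =====
def solution_alt (n : Int) : Int :=
  ((PySem.List.pyRange 2 (n + 1) 1).foldl
      (fun (s : Int × Int) m => let p := s.2 * (11 - m); (s.1 + p, p)) (10, 9)).1

-- ===== PRECONDITION & SPEC =====
-- Pre_ excludes exactly n <= 0, where Python's A recurses without bound and raises RecursionError.
def Pre_solution (n : Int) : Prop := 1 ≤ n
instance (n : Int) : Decidable (Pre_solution n) := by unfold Pre_solution; infer_instance
def pvWitness_solution : Int := 3
def Spec_solution (n : Int) (out : Int) : Prop := out = solution_alt n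
instance (n : Int) (out : Int) : Decidable (Spec_solution n out) := by unfold Spec_solution; infer_instance

-- ===== CLAIM (what is proved, stated in full; the proofs are below) =====
def Claim_equal_solution : Prop := ∀ (n : Int), Dom_solution n → Pre_solution n → Spec_solution n (solution n)

-- ===== LEMMAS AND PROOFS =====

-- A's inner product at level n.
def proA (n : Int) : Int := (PySem.List.pyRange 0 (n - 1) 1).foldl (fun pro i => pro * (9 - i)) 9

theorem proA_succ (n : Int) (h : 1 ≤ n) : proA (n + 1) = proA n * (11 - (n + 1)) := by
  unfold proA
  rw [show n + 1 - 1 = (n - 1) + 1 by ring,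
      PySem.List.pyRange_one_succ_right (by omega : (0:Int) ≤ n - 1),
      List.foldl_append]
  simp only [List.foldl]
  ring_nf

theorem solution_unfold (n : Int) (h : 2 ≤ n) :
    solution n = proA n + solution (n - 1) := by
  rw [solution]
  have h1 : (n == 1) = false := by simp; omega
  have h2 : ¬ n < 1 := by omega
  simp [h1, h2, proA]

-- The loop invariant: B's fold state after processing range(2, n+1) is (A's sum, A's product).
theorem alt_state (n : Int) (h : 1 ≤ n) :
    (PySem.List.pyRange 2 (n + 1) 1).foldl
      (fun (s : Int × Int) m => let p := s.2 * (11 - m); (s.1 + p, p)) (10, 9)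
      = (solution n, proA n) := by
  have hn : 0 ≤ n - 1 := by omega
  obtain ⟨k, hk⟩ : ∃ k : Nat, n = 1 + (k : Int) := ⟨(n - 1).toNat, by omega⟩
  subst hk
  induction k with
  | zero =>
    rw [PySem.List.pyRange_one_eq_nil (by norm_num)]
    simp [solution, proA, PySem.List.pyRange_one_eq_nil]
  | succ k ih =>
    have hk1 : (1:Int) ≤ 1 + (k : Int) := by omega
    rw [show (1:Int) + ((k + 1 : Nat) : Int) + 1 = (1 + (k : Int) + 1) + 1 by push_cast; ring,
        PySem.List.pyRange_one_succ_right (by omega : (2:Int) ≤ 1 + (k : Int) + 1),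
        List.foldl_append, ih hk1 (by omega)]
    simp only [List.foldl]
    have hs : solution (1 + ((k + 1 : Nat) : Int)) = proA (1 + ((k + 1 : Nat) : Int)) + solution (1 + (k : Int)) := by
      rw [solution_unfold _ (by push_cast; omega)]
      norm_num
      ring_nf
    rw [show (1:Int) + ((k + 1 : Nat) : Int) = (1 + (k : Int)) + 1 by push_cast; ring] at hs ⊢
    rw [hs, proA_succ _ hk1]
    rw [Prod.mk.injEq]; exact ⟨by ring, rfl⟩

-- ===== VERDICT (by name: the statement is the Claim_ definition above) =====
theorem solution_spec : Claim_equal_solution := by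
  intro n _ hpre
  unfold Spec_solution solution_alt
  rw [alt_state n hpre]
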